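-- pv_equiv track=rewrite | github.com/AlvinLuoooo/373 | 2021_S1_CS373_Assignment-main/2021_S1_CS373_Assignment-main/imageIO/QRCodeDetection.py | computeMedian5x3ZeroPadding
-- ===== SOURCE A (Python) =====
-- def computeMedian5x3ZeroPadding(pixel_array, image_width, image_height):
--     pixel_array1 = [[0 for i in range(image_width+4)]]
--     for i in range(image_height):
--         n = [0,0]+pixel_array[i]+[0,0]
--         pixel_array1.append(n)
--     pixel_array1.append([0 for i in range(image_width+4)])
--     out=[[0 for x in range(image_width)] for y in range(image_height)]
--     for i in range(1,image_height+1):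
--         for j in range(2,image_width+2):
--             m = [pixel_array1[i-1][j-2],pixel_array1[i-1][j-1],pixel_array1[i-1][j],\
--             pixel_array1[i-1][j+1],pixel_array1[i-1][j+2],pixel_array1[i][j-2],pixel_array1[i][j-1],\
--             pixel_array1[i][j],pixel_array1[i][j+1],pixel_array1[i][j+2],pixel_array1[i+1][j-2],\
--             pixel_array1[i+1][j-1],pixel_array1[i+1][j],pixel_array1[i+1][j+1],pixel_array1[i+1][j+2]]
--             m.sort()
--             out[i-1][j-2]=m[7]
--     return out
-- ===== SOURCE B (Python) =====
-- def computeMedian5x3ZeroPadding(pixel_array, image_width, image_height):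
--     def window(i, j):
--         vals = []
--         for di in (-1, 0, 1):
--             for dj in (-2, -1, 0, 1, 2):
--                 r, c = i + di, j + dj
--                 if 0 <= r < image_height and 0 <= c < image_width:
--                     vals.append(pixel_array[r][c])
--                 else:
--                     vals.append(0)
--         return vals
--     out = []
--     for i in range(image_height):
--         row = []
--         for j in range(image_width):
--             w = window(i, j)
--             # median by counting selection: the 8th smallest is the least window value
--             # having at least 8 window values <= it (no sorting)
--             row.append(min(v for v in w if sum(1 for x in w if x <= v) >= 8))
--         out.append(row)
--     return out
-- ===== Notes on version B (the rewrite author's own statement) =====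
-- stated objective: alternative
-- what changed: B drops A's padded-array construction and replaces the per-pixel sort entirely: it gathers the 3x5 window with bounds checks (out-of-range -> 0) and computes the median by counting selection -- the 8th smallest value is the least window value v with at least 8 window values <= v -- so no sorted copy of the window is ever built. Pre_ excludes non-rectangular inputs: if one of the first image_height rows is longer than image_width (with image_width>0) A's padded array silently reads pixels beyond the stated width, and if a row is shorter or rows are missing A raises; …
-- outside the precondition, e.g. on computeMedian5x3ZeroPadding([[5, 9, 9, 2], [4, 6, 6, 1]], 2, 2): A returns [[0, 1], [0, 1]], B returns [[0, 0], [0, 0]]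
import Mathlib
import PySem

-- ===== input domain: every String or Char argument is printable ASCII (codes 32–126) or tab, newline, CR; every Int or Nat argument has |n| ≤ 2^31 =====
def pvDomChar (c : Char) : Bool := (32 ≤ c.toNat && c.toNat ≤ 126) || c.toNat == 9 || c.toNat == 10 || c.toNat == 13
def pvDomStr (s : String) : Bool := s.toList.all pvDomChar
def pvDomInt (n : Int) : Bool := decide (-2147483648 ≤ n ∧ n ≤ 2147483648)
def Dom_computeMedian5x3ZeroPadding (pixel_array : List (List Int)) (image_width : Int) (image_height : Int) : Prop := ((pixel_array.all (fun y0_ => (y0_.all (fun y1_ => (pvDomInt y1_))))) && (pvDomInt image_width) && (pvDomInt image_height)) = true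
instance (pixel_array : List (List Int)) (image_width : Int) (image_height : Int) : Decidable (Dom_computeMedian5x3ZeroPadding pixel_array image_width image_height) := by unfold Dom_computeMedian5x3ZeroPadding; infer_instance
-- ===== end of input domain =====

-- B drops A's padded array and replaces the per-window sort by counting selection
-- (the 8th smallest = least window value with at least 8 window values ≤ it): no sort, no padded copy.

-- ===== PORT A =====
-- [0 for i in range(image_width+4)]
def aZeroRow (image_width : Int) : List Int :=
  (PySem.List.pyRange 0 (image_width + 4) 1).map (fun _ => (0 : Int))

-- the 15-element window m built from pixel_array1 at (i, j); indices are provably in range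
-- during A's loops, so the total forms pyGetD (with defaults [] / 0) are exact there.
def aWindow (p1 : List (List Int)) (i j : Int) : List Int :=
  [PySem.List.pyGetD (PySem.List.pyGetD p1 (i-1) []) (j-2) 0,
   PySem.List.pyGetD (PySem.List.pyGetD p1 (i-1) []) (j-1) 0,
   PySem.List.pyGetD (PySem.List.pyGetD p1 (i-1) []) j 0,
   PySem.List.pyGetD (PySem.List.pyGetD p1 (i-1) []) (j+1) 0,
   PySem.List.pyGetD (PySem.List.pyGetD p1 (i-1) []) (j+2) 0,
   PySem.List.pyGetD (PySem.List.pyGetD p1 i []) (j-2) 0,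
   PySem.List.pyGetD (PySem.List.pyGetD p1 i []) (j-1) 0,
   PySem.List.pyGetD (PySem.List.pyGetD p1 i []) j 0,
   PySem.List.pyGetD (PySem.List.pyGetD p1 i []) (j+1) 0,
   PySem.List.pyGetD (PySem.List.pyGetD p1 i []) (j+2) 0,
   PySem.List.pyGetD (PySem.List.pyGetD p1 (i+1) []) (j-2) 0,
   PySem.List.pyGetD (PySem.List.pyGetD p1 (i+1) []) (j-1) 0,
   PySem.List.pyGetD (PySem.List.pyGetD p1 (i+1) []) j 0,
   PySem.List.pyGetD (PySem.List.pyGetD p1 (i+1) []) (j+1) 0,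
   PySem.List.pyGetD (PySem.List.pyGetD p1 (i+1) []) (j+2) 0]

-- m.sort(); m[7]
def aCell (p1 : List (List Int)) (i j : Int) : Int :=
  PySem.List.pyGetD (PySem.List.sorted (aWindow p1 i j) (fun x => x) false) 7 0

def computeMedian5x3ZeroPadding (pixel_array : List (List Int)) (image_width : Int) (image_height : Int) : List (List Int) :=
  -- pixel_array1 = [[0]*(w+4)]; for i in range(h): append [0,0]+pixel_array[i]+[0,0]; append [0]*(w+4)
  let p1 := (PySem.List.pyRange 0 image_height 1).foldl
      (fun acc i => acc ++ [([0, 0] : List Int) ++ (PySem.List.pyGet? pixel_array i).getD [] ++ [0, 0]])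
      [aZeroRow image_width]
  let p1 := p1 ++ [aZeroRow image_width]
  -- out = [[0]*w for _ in range(h)]
  let out := (PySem.List.pyRange 0 image_height 1).map
      (fun _ => (PySem.List.pyRange 0 image_width 1).map (fun _ => (0 : Int)))
  -- for i in range(1, h+1): for j in range(2, w+2): out[i-1][j-2] = m[7]
  (PySem.List.pyRange 1 (image_height + 1) 1).foldl (fun out i =>
    (PySem.List.pyRange 2 (image_width + 2) 1).foldl (fun out j =>
      PySem.List.pySetD out (i-1)
        (PySem.List.pySetD (PySem.List.pyGetD out (i-1) []) (j-2) (aCell p1 i j))) out) out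

-- ===== PORT B =====
-- pixel_array[r][c] if in bounds else 0 (the guarded access inside window's inner loop;
-- in range under Pre_, so the total pyGetD forms are exact there)
def altVal (pixel_array : List (List Int)) (image_width image_height : Int) (r c : Int) : Int :=
  if 0 ≤ r ∧ r < image_height ∧ 0 ≤ c ∧ c < image_width then
    PySem.List.pyGetD (PySem.List.pyGetD pixel_array r []) c 0
  else 0

-- window(i, j): nested loops over (-1,0,1) × (-2,-1,0,1,2), appending the guarded value
def altWindow (pixel_array : List (List Int)) (image_width image_height : Int) (i j : Int) : List Int :=
  ([-1, 0, 1] : List Int).foldl (fun vals di =>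
    ([-2, -1, 0, 1, 2] : List Int).foldl (fun vals dj =>
      vals ++ [altVal pixel_array image_width image_height (i + di) (j + dj)]) vals) []

-- min(v for v in w if sum(1 for x in w if x <= v) >= 8): counting selection, no sort
def altMedian (pixel_array : List (List Int)) (image_width image_height : Int) (i j : Int) : Int :=
  let w := altWindow pixel_array image_width image_height i j
  (PySem.List.min?
    (w.filter (fun v => decide (8 ≤ w.countP (fun x => decide (x ≤ v)))))
    (fun x => x)).getD 0   -- the filtered list is never empty (w's maximum qualifies), so min returns

def computeMedian5x3ZeroPadding_alt (pixel_array : List (List Int)) (image_width : Int) (image_height : Int) : List (List Int) :=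
  (PySem.List.pyRange 0 image_height 1).foldl (fun out i =>
    out ++ [(PySem.List.pyRange 0 image_width 1).foldl (fun row j =>
      row ++ [altMedian pixel_array image_width image_height i j]) []]) []

-- ===== PRECONDITION & SPEC =====
-- Pre_ excludes non-rectangular inputs: if one of the first image_height rows is longer than
-- image_width (with image_width > 0) A's padded array silently reads pixels beyond the stated
-- width, and if a row is shorter or rows are missing A raises IndexError; it also requires
-- image_height ≤ len(pixel_array) (else A raises).
def Pre_computeMedian5x3ZeroPadding (pixel_array : List (List Int)) (image_width : Int) (image_height : Int) : Prop :=
  image_height ≤ (pixel_array.length : Int) ∧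
  (0 < image_width → ∀ row ∈ pixel_array.take image_height.toNat, (row.length : Int) = image_width)

instance (pixel_array : List (List Int)) (image_width : Int) (image_height : Int) : Decidable (Pre_computeMedian5x3ZeroPadding pixel_array image_width image_height) := by unfold Pre_computeMedian5x3ZeroPadding; infer_instance

def pvWitness_computeMedian5x3ZeroPadding : List (List Int) × Int × Int := ([[1, 2], [3, 4]], 2, 2)

def Spec_computeMedian5x3ZeroPadding (pixel_array : List (List Int)) (image_width : Int) (image_height : Int) (out : List (List Int)) : Prop := out = computeMedian5x3ZeroPadding_alt pixel_array image_width image_height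
instance (pixel_array : List (List Int)) (image_width : Int) (image_height : Int) (out : List (List Int)) : Decidable (Spec_computeMedian5x3ZeroPadding pixel_array image_width image_height out) := by unfold Spec_computeMedian5x3ZeroPadding; infer_instance

-- ===== CLAIM (what is proved, stated in full; the proofs are below) =====
def Claim_equal_computeMedian5x3ZeroPadding : Prop := ∀ (pixel_array : List (List Int)) (image_width : Int) (image_height : Int), Dom_computeMedian5x3ZeroPadding pixel_array image_width image_height → Pre_computeMedian5x3ZeroPadding pixel_array image_width image_height → Spec_computeMedian5x3ZeroPadding pixel_array image_width image_height (computeMedian5x3ZeroPadding pixel_array image_width image_height)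

-- ===== LEMMAS AND PROOFS =====

-- the padded array, in characterized form
def pvP1 (pixel_array : List (List Int)) (image_width image_height : Int) : List (List Int) :=
  aZeroRow image_width ::
    ((PySem.List.pyRange 0 image_height 1).map
      (fun i => ([0, 0] : List Int) ++ (PySem.List.pyGet? pixel_array i).getD [] ++ [0, 0]))
    ++ [aZeroRow image_width]

lemma take_set_succ {α : Type} : ∀ (l : List α) (k : Nat) (v : α), k < l.length →
    (l.set k v).take (k+1) = l.take k ++ [v] := by
  intro l
  induction l with
  | nil => intro k v h; simp at h
  | cons x xs ih =>
    intro k v h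
    cases k with
    | zero => simp
    | succ k =>
      simp only [List.set_cons_succ, List.take_succ_cons, List.cons_append]
      rw [ih k v (by simpa using h)]

-- counting selection agrees with sorting: the (k+1)-th smallest of m is the least
-- element of m having at least k+1 elements of m ≤ it
lemma sorted_get_eq_min_count (m : List Int) (k : Nat) (hk : k < m.length) :
    PySem.List.pyGetD (PySem.List.sorted m (fun x => x) false) ((k : Nat) : Int) 0
      = (PySem.List.min?
          (m.filter (fun v => decide (k + 1 ≤ m.countP (fun x => decide (x ≤ v)))))
          (fun x => x)).getD 0 := by
  set s := PySem.List.sorted m (fun x => x) false with hs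
  have hperm : s.Perm m := PySem.List.sorted_perm m _ false
  have hlen : s.length = m.length := hperm.length_eq
  have hks : k < s.length := by omega
  have hget : PySem.List.pyGetD s ((k : Nat) : Int) 0 = s[k] := by
    rw [PySem.List.pyGetD_natCast, List.getD_eq_getElem?_getD, List.getElem?_eq_getElem hks]
    rfl
  have hmono : ∀ (p q : Nat) (hpq : p ≤ q) (hq : q < s.length),
      s[p]'(Nat.lt_of_le_of_lt hpq hq) ≤ s[q] :=
    fun _ _ hpq hq => PySem.List.sorted_id_getElem_mono m hpq hq
  set a := s[k] with ha
  -- a is in the filtered list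
  have hcount_a : k + 1 ≤ m.countP (fun x => decide (x ≤ a)) := by
    rw [← hperm.countP_eq]
    have hsplit : s = s.take (k+1) ++ s.drop (k+1) := (List.take_append_drop _ _).symm
    rw [hsplit, List.countP_append]
    have htake : (s.take (k+1)).countP (fun x => decide (x ≤ a)) = (s.take (k+1)).length := by
      rw [List.countP_eq_length]
      intro x hx
      obtain ⟨p, hp, hpx⟩ := List.getElem_of_mem hx
      rw [List.length_take] at hp
      rw [← hpx, List.getElem_take]
      simp only [decide_eq_true_eq]
      exact hmono p k (by omega) hks
    rw [htake, List.length_take]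
    omega
  have hmem_a : a ∈ m := hperm.mem_iff.mp (List.getElem_mem hks)
  have hfa : a ∈ m.filter (fun v => decide (k + 1 ≤ m.countP (fun x => decide (x ≤ v)))) := by
    rw [List.mem_filter]
    exact ⟨hmem_a, by simpa using hcount_a⟩
  -- a is a lower bound of the filtered list
  have hlb : ∀ v ∈ m.filter (fun v => decide (k + 1 ≤ m.countP (fun x => decide (x ≤ v)))), a ≤ v := by
    intro v hv
    rw [List.mem_filter] at hv
    have hcv : k + 1 ≤ m.countP (fun x => decide (x ≤ v)) := by simpa using hv.2
    by_contra hlt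
    have : m.countP (fun x => decide (x ≤ v)) ≤ k := by
      rw [← hperm.countP_eq]
      have hsplit : s = s.take k ++ s.drop k := (List.take_append_drop _ _).symm
      rw [hsplit, List.countP_append]
      have hdrop : (s.drop k).countP (fun x => decide (x ≤ v)) = 0 := by
        rw [List.countP_eq_zero]
        intro x hx
        obtain ⟨p, hp, hpx⟩ := List.getElem_of_mem hx
        rw [List.length_drop] at hp
        rw [← hpx, List.getElem_drop]
        simp only [decide_eq_true_eq]
        have := hmono k (k + p) (by omega) (by omega)
        omega
      have htake : (s.take k).countP (fun x => decide (x ≤ v)) ≤ k := by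
        calc (s.take k).countP (fun x => decide (x ≤ v)) ≤ (s.take k).length := List.countP_le_length
        _ ≤ k := by rw [List.length_take]; omega
      omega
    omega
  -- hence min of the filtered list is a
  rw [hget]
  obtain ⟨b, hb⟩ : ∃ b, PySem.List.min?
      (m.filter (fun v => decide (k + 1 ≤ m.countP (fun x => decide (x ≤ v))))) (fun x => x) = some b := by
    cases hmin : PySem.List.min?
        (m.filter (fun v => decide (k + 1 ≤ m.countP (fun x => decide (x ≤ v))))) (fun x => x) with
    | none =>
      rw [PySem.List.min?_eq_none_iff] at hmin
      rw [hmin] at hfa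
      exact absurd hfa (List.not_mem_nil)
    | some b => exact ⟨b, rfl⟩
  have hbmem := PySem.List.min?_mem hb
  have hbmin := PySem.List.min?_isMin hb
  rw [hb]
  have h1 : a ≤ b := hlb b hbmem
  have h2 : b ≤ a := hbmin a hfa
  simp only [Option.getD_some]
  omega

-- the window loop of B, unrolled
lemma altWindow_eq (pa : List (List Int)) (w h i j : Int) :
    altWindow pa w h i j =
      [altVal pa w h (i-1) (j-2), altVal pa w h (i-1) (j-1), altVal pa w h (i-1) j,
       altVal pa w h (i-1) (j+1), altVal pa w h (i-1) (j+2),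
       altVal pa w h i (j-2), altVal pa w h i (j-1), altVal pa w h i j,
       altVal pa w h i (j+1), altVal pa w h i (j+2),
       altVal pa w h (i+1) (j-2), altVal pa w h (i+1) (j-1), altVal pa w h (i+1) j,
       altVal pa w h (i+1) (j+1), altVal pa w h (i+1) (j+2)] := by
  simp only [altWindow, List.foldl_cons, List.foldl_nil, List.nil_append, List.cons_append,
    List.append_assoc]
  norm_num
  and_intros <;> congr 1

lemma grid_get (pa : List (List Int)) (w h : Int)
    (hPre : Pre_computeMedian5x3ZeroPadding pa w h) (hw : 0 < w)
    (a b : Int) (ha0 : 0 ≤ a) (ha1 : a ≤ h + 1) (hb0 : 0 ≤ b) (hb1 : b ≤ w + 3) :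
    PySem.List.pyGetD (PySem.List.pyGetD (pvP1 pa w h) a []) b 0 = altVal pa w h (a-1) (b-2) := by
  obtain ⟨hPre1, hPre2⟩ := hPre
  have hzget : ∀ b' : Int, 0 ≤ b' → b' < w + 4 → PySem.List.pyGetD (aZeroRow w) b' 0 = 0 := by
    intro b' h0 h1
    exact PySem.List.pyGetD_map_pyRange_of_nonneg _ _ _ _ h0 h1
  have hlenM : ((PySem.List.pyRange 0 h 1).map
      (fun i => ([0, 0] : List Int) ++ (PySem.List.pyGet? pa i).getD [] ++ [0, 0])).length = h.toNat := by
    rw [List.length_map, PySem.List.length_pyRange_one]; omega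
  have hlenP : (pvP1 pa w h).length = h.toNat + 2 := by
    unfold pvP1
    simp
  have houter : PySem.List.pyGetD (pvP1 pa w h) a [] = (pvP1 pa w h)[a.toNat]'(by omega) := by
    exact PySem.List.pyGetD_eq_getElem _ _ ha0 (by rw [hlenP]; push_cast; omega)
  rw [houter]
  by_cases hA0 : a = 0
  · subst hA0
    show PySem.List.pyGetD (aZeroRow w) b 0 = altVal pa w h (0-1) (b-2)
    rw [hzget b hb0 (by omega)]
    unfold altVal
    rw [if_neg (by omega)]
  · by_cases hAtop : a = h + 1
    · have hh0 : 0 ≤ h := by omega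
      have hcast : a.toNat = h.toNat + 1 := by omega
      have hmain : (pvP1 pa w h)[a.toNat]'(by omega) = aZeroRow w := by
        unfold pvP1
        rw [List.getElem_append_right (by simp; omega)]
        simp [hcast]
      rw [hmain, hzget b hb0 (by omega)]
      unfold altVal
      rw [if_neg (by omega)]
    · -- 1 ≤ a ≤ h : a data row
      have ha1' : 1 ≤ a := by omega
      have hah : a ≤ h := by omega
      set k : Nat := (a - 1).toNat with hkdef
      have hka : a.toNat = k + 1 := by omega
      have hkh : k < h.toNat := by omega
      have hklen : k < pa.length := by omega
      have hdata : (pa.take h.toNat)[k]'(by simp; omega) = pa[k]'hklen := List.getElem_take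
      have hdlen : ((pa[k]'hklen).length : Int) = w := by
        rw [← hdata]
        exact hPre2 hw _ (List.getElem_mem _)
      have hmain : (pvP1 pa w h)[a.toNat]'(by omega)
          = ([0, 0] : List Int) ++ (PySem.List.pyGet? pa ((0 : Int) + (k : Int))).getD [] ++ [0, 0] := by
        unfold pvP1
        rw [List.getElem_append_left (by simp; omega), List.getElem_cons]
        rw [dif_neg (by omega)]
        have hk2 : a.toNat - 1 = k := by omega
        rw [List.getElem_map, PySem.List.getElem_pyRange_one, hk2]
      have hget : (PySem.List.pyGet? pa ((0 : Int) + (k : Int))).getD [] = pa[k]'hklen := by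
        rw [zero_add, PySem.List.pyGet?_natCast, List.getElem?_eq_getElem hklen]
        rfl
      rw [hmain, hget]
      set data : List Int := pa[k]'hklen with hddef
      have hrowlen : ((([0, 0] : List Int) ++ data ++ [0, 0]).length : Int) = w + 4 := by
        simp; omega
      have hbcast : b = ((b.toNat : Nat) : Int) := by omega
      rw [hbcast, PySem.List.pyGetD_natCast, List.getD_eq_getElem?_getD]
      unfold altVal
      have hcond : ((0 : Int) ≤ a - 1 ∧ a - 1 < h) := ⟨by omega, by omega⟩
      by_cases hbw : 2 ≤ b ∧ b ≤ w + 1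
      · rw [if_pos ⟨hcond.1, hcond.2, by omega, by omega⟩]
        have hra : a - 1 = ((k : Nat) : Int) := by omega
        have hget2 : PySem.List.pyGetD pa (a-1) [] = data := by
          rw [hra, PySem.List.pyGetD_natCast, List.getD_eq_getElem?_getD,
              List.getElem?_eq_getElem hklen]
          rfl
        rw [hget2]
        have hb2cast : (b.toNat : Int) - 2 = (((b-2).toNat : Nat) : Int) := by omega
        rw [hb2cast, PySem.List.pyGetD_natCast, List.getD_eq_getElem?_getD]
        have hbn : b.toNat = (b-2).toNat + 1 + 1 := by omega
        rw [hbn, List.getElem?_append_left (by simp; omega)]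
        rfl
      · rw [if_neg (by omega)]
        rcases (by omega : b = 0 ∨ b = 1 ∨ b = w + 2 ∨ b = w + 3) with hb | hb | hb | hb
        · subst hb; rfl
        · subst hb; rfl
        · rw [List.getElem?_append_right (by simp; omega)]
          have : b.toNat - (([0, 0] : List Int) ++ data).length = 0 := by simp; omega
          rw [this]
          rfl
        · rw [List.getElem?_append_right (by simp; omega)]
          have : b.toNat - (([0, 0] : List Int) ++ data).length = 1 := by simp; omega
          rw [this]
          rfl

lemma cell_eq (pa : List (List Int)) (w h : Int)
    (hPre : Pre_computeMedian5x3ZeroPadding pa w h)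
    (i j : Int) (hi1 : 1 ≤ i) (hi2 : i ≤ h) (hj1 : 2 ≤ j) (hj2 : j < w + 2) :
    aCell (pvP1 pa w h) i j = altMedian pa w h (i-1) (j-2) := by
  have hw : 0 < w := by omega
  have G := grid_get pa w h hPre hw
  have hlist : aWindow (pvP1 pa w h) i j = altWindow pa w h (i-1) (j-2) := by
    rw [altWindow_eq]
    unfold aWindow
    rw [G (i-1) (j-2) (by omega) (by omega) (by omega) (by omega),
      G (i-1) (j-1) (by omega) (by omega) (by omega) (by omega),
      G (i-1) j (by omega) (by omega) (by omega) (by omega),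
      G (i-1) (j+1) (by omega) (by omega) (by omega) (by omega),
      G (i-1) (j+2) (by omega) (by omega) (by omega) (by omega),
      G i (j-2) (by omega) (by omega) (by omega) (by omega),
      G i (j-1) (by omega) (by omega) (by omega) (by omega),
      G i j (by omega) (by omega) (by omega) (by omega),
      G i (j+1) (by omega) (by omega) (by omega) (by omega),
      G i (j+2) (by omega) (by omega) (by omega) (by omega),
      G (i+1) (j-2) (by omega) (by omega) (by omega) (by omega),
      G (i+1) (j-1) (by omega) (by omega) (by omega) (by omega),
      G (i+1) j (by omega) (by omega) (by omega) (by omega),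
      G (i+1) (j+1) (by omega) (by omega) (by omega) (by omega),
      G (i+1) (j+2) (by omega) (by omega) (by omega) (by omega)]
    norm_num
    and_intros <;> congr 1 <;> omega
  unfold aCell altMedian
  rw [hlist]
  have h15 : (7 : Nat) < (altWindow pa w h (i-1) (j-2)).length := by
    rw [altWindow_eq]; simp
  have := sorted_get_eq_min_count (altWindow pa w h (i-1) (j-2)) 7 h15
  simpa using this

-- the inner loop writes the whole row a left to right
lemma inner_fill (g : Int → Int) (w : Int) (a : Nat) :
    ∀ (n : Nat) (lo : Int) (out : List (List Int)) (row : List Int),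
    n = (w + 2 - lo).toNat → 2 ≤ lo → lo ≤ w + 2 →
    out[a]? = some row → row.length = w.toNat →
    (PySem.List.pyRange lo (w+2) 1).foldl
      (fun o j => PySem.List.pySetD o ((a : Nat) : Int)
        (PySem.List.pySetD (PySem.List.pyGetD o ((a : Nat) : Int) []) (j-2) (g j))) out
    = out.set a (row.take (lo-2).toNat ++ (PySem.List.pyRange lo (w+2) 1).map g) := by
  intro n
  induction n with
  | zero =>
    intro lo out row hn h2 hle hget hlen
    have hlo : w + 2 ≤ lo := by omega
    rw [PySem.List.pyRange_one_eq_nil hlo]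
    have ha : a < out.length := by
      by_contra hc
      rw [List.getElem?_eq_none (by omega)] at hget
      simp at hget
    have hrow : out[a] = row := by
      have := List.getElem?_eq_getElem ha
      rw [this] at hget; exact (Option.some.injEq _ _).mp hget
    have htake : row.take (lo-2).toNat = row := List.take_of_length_le (by omega)
    simp only [List.foldl_nil, List.map_nil, List.append_nil, htake]
    rw [← hrow, List.set_getElem_self ha]
  | succ n ih =>
    intro lo out row hn h2 hle hget hlen
    have hlt : lo < w + 2 := by omega
    have ha : a < out.length := by
      by_contra hc
      rw [List.getElem?_eq_none (by omega)] at hget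
      simp at hget
    rw [PySem.List.pyRange_one_cons hlt]
    simp only [List.foldl_cons, List.map_cons]
    have hgetD : out.getD a [] = row := by
      rw [List.getD_eq_getElem?_getD, hget]; rfl
    have hstep : PySem.List.pySetD out ((a : Nat) : Int)
        (PySem.List.pySetD (PySem.List.pyGetD out ((a : Nat) : Int) []) (lo-2) (g lo))
        = out.set a (row.set (lo-2).toNat (g lo)) := by
      rw [PySem.List.pyGetD_natCast, PySem.List.pySetD_natCast, hgetD,
          PySem.List.pySetD_of_nonneg row (g lo) (show (0:Int) ≤ lo - 2 by omega)]
    rw [hstep]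
    have hklt : (lo-2).toNat < row.length := by omega
    rw [ih (lo+1) (out.set a (row.set (lo-2).toNat (g lo))) (row.set (lo-2).toNat (g lo))
        (by omega) (by omega) (by omega)
        (by rw [List.getElem?_set_self ha])
        (by rw [List.length_set]; exact hlen)]
    rw [List.set_set]
    congr 1
    have h1 : (lo+1-2).toNat = (lo-2).toNat + 1 := by omega
    rw [h1, take_set_succ row (lo-2).toNat (g lo) hklt, List.append_assoc]
    rfl

-- the outer loop replaces the zero rows by the computed rows, top to bottom
lemma outer_fill (cell : Int → Int → Int) (w h : Int) :
    ∀ (n : Nat) (lo : Int) (out : List (List Int)),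
    n = (h + 1 - lo).toNat → 1 ≤ lo → lo ≤ h + 1 →
    (out.length : Int) = h →
    (∀ (k : Nat) (hk : k < out.length), (lo-1).toNat ≤ k →
        out[k] = (PySem.List.pyRange 0 w 1).map (fun _ => (0 : Int))) →
    (PySem.List.pyRange lo (h+1) 1).foldl (fun o i =>
      (PySem.List.pyRange 2 (w+2) 1).foldl (fun o' j =>
        PySem.List.pySetD o' (i-1)
          (PySem.List.pySetD (PySem.List.pyGetD o' (i-1) []) (j-2) (cell i j))) o) out
    = out.take (lo-1).toNat ++ (PySem.List.pyRange lo (h+1) 1).map (fun i => (PySem.List.pyRange 2 (w+2) 1).map (cell i)) := by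
  intro n
  induction n with
  | zero =>
    intro lo out hn h1 hle hlen hzero
    have hnil : h + 1 ≤ lo := by omega
    rw [PySem.List.pyRange_one_eq_nil hnil]
    simp only [List.foldl_nil, List.map_nil, List.append_nil]
    rw [List.take_of_length_le (by omega)]
  | succ n ih =>
    intro lo out hn h1 hle hlen hzero
    have hlt : lo < h + 1 := by omega
    have hk : (lo-1).toNat < out.length := by omega
    rw [PySem.List.pyRange_one_cons hlt]
    simp only [List.foldl_cons, List.map_cons]
    have hstep : (PySem.List.pyRange 2 (w+2) 1).foldl (fun o' j =>
        PySem.List.pySetD o' (lo-1)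
          (PySem.List.pySetD (PySem.List.pyGetD o' (lo-1) []) (j-2) (cell lo j))) out
        = out.set (lo-1).toNat ((PySem.List.pyRange 2 (w+2) 1).map (cell lo)) := by
      by_cases hw : 0 ≤ w
      · have hcast : lo - 1 = (((lo-1).toNat : Nat) : Int) := by omega
        rw [hcast]
        rw [inner_fill (cell lo) w (lo-1).toNat (w + 2 - 2).toNat 2 out
            ((PySem.List.pyRange 0 w 1).map (fun _ => (0 : Int)))
            (by omega) (by omega) (by omega)
            (by rw [List.getElem?_eq_getElem hk, hzero _ hk (le_refl _)])
            (by rw [List.length_map, PySem.List.length_pyRange_one]; omega)]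
        simp
      · have hr2 : PySem.List.pyRange 2 (w+2) 1 = [] := PySem.List.pyRange_one_eq_nil (by omega)
        have hz : PySem.List.pyRange 0 w 1 = [] := PySem.List.pyRange_one_eq_nil (by omega)
        have hrow : out[(lo-1).toNat] = (PySem.List.pyRange 0 w 1).map (fun _ => (0 : Int)) :=
          hzero _ hk (le_refl _)
        rw [hz, List.map_nil] at hrow
        rw [hr2, List.foldl_nil, List.map_nil, ← hrow, List.set_getElem_self hk]
    rw [hstep, ih (lo+1) _ (by omega) (by omega) (by omega)
        (by rw [List.length_set]; exact hlen)
        (by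
          intro k hk2 hge
          rw [List.getElem_set_ne (by omega)]
          exact hzero k (by simpa using hk2) (by omega))]
    have h2 : (lo + 1 - 1).toNat = (lo - 1).toNat + 1 := by omega
    rw [h2, take_set_succ out (lo-1).toNat _ hk, List.append_assoc]
    rfl

-- ===== VERDICT (by name: the statement is the Claim_ definition above) =====
theorem computeMedian5x3ZeroPadding_spec : Claim_equal_computeMedian5x3ZeroPadding := by
  intro pa w h _ hPre
  unfold Spec_computeMedian5x3ZeroPadding
  have hrow : ∀ i : Int, (PySem.List.pyRange 0 w 1).foldl (fun row j =>
      row ++ [altMedian pa w h i j]) [] = (PySem.List.pyRange 0 w 1).map (fun j => altMedian pa w h i j) := by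
    intro i
    rw [PySem.List.foldl_append_singleton_eq_map]
    simp
  have halt : computeMedian5x3ZeroPadding_alt pa w h
      = (PySem.List.pyRange 0 h 1).map (fun i => (PySem.List.pyRange 0 w 1).map (fun j => altMedian pa w h i j)) := by
    unfold computeMedian5x3ZeroPadding_alt
    rw [PySem.List.foldl_append_singleton_eq_map]
    simp only [List.nil_append, hrow]
  rw [halt]
  unfold computeMedian5x3ZeroPadding
  by_cases hh : 0 ≤ h
  · have hP1 : (PySem.List.pyRange 0 h 1).foldl
        (fun acc i => acc ++ [([0, 0] : List Int) ++ (PySem.List.pyGet? pa i).getD [] ++ [0, 0]])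
        [aZeroRow w] ++ [aZeroRow w] = pvP1 pa w h := by
      rw [PySem.List.foldl_append_singleton_eq_map]; rfl
    simp only [hP1]
    rw [outer_fill (aCell (pvP1 pa w h)) w h (h + 1 - 1).toNat 1 _ rfl (by omega) (by omega)
        (by rw [List.length_map, PySem.List.length_pyRange_one]; omega)
        (by
          intro k hk hge
          rw [List.getElem_map])]
    simp only [Int.sub_self, Int.toNat_zero, List.take_zero, List.nil_append]
    rw [PySem.List.pyRange_one 1 (h+1), PySem.List.pyRange_one 0 h,
        PySem.List.pyRange_one 2 (w+2), PySem.List.pyRange_one 0 w]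
    simp only [List.map_map]
    have hhh : (h + 1 - 1).toNat = (h - 0).toNat := by omega
    have hww : (w + 2 - 2).toNat = (w - 0).toNat := by omega
    rw [hhh, hww]
    apply List.map_congr_left
    intro k hk
    simp only [Function.comp_apply]
    apply List.map_congr_left
    intro l hl
    simp only [Function.comp_apply]
    have := cell_eq pa w h hPre (1 + (k : Int)) (2 + (l : Int))
      (by omega) (by simp at hk; omega) (by omega) (by simp at hl; omega)
    rw [this]
    norm_num
  · have e1 : PySem.List.pyRange 1 (h+1) 1 = [] := PySem.List.pyRange_one_eq_nil (by omega)
    have e2 : PySem.List.pyRange 0 h 1 = [] := PySem.List.pyRange_one_eq_nil (by omega)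
    simp [e1, e2]
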